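-- pv_equiv track=rewrite | github.com/jaykkong-coder/IPO_Dashboard | ipo_extractor.py | find_tables_with_keywords
-- ===== SOURCE A (Python) =====
-- def find_tables_with_keywords(tables, keywords, top_n=5):
--     """키워드 점수가 높은 테이블 반환"""
--     scored = []
--     for t in tables:
--         score = sum(1 for kw in keywords if kw in t["flat"])
--         if score > 0:
--             scored.append((t, score))
--     scored.sort(key=lambda x: -x[1])
--     return scored[:top_n]
-- ===== SOURCE B (Python) =====
-- def find_tables_with_keywords(tables, keywords, top_n=5):
--     """Bucket (counting) sort by score instead of a comparison sort."""
--     buckets = {}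
--     for t in tables:
--         score = 0
--         for kw in keywords:
--             if kw in t["flat"]:
--                 score += 1
--         if score > 0:
--             buckets.setdefault(score, []).append((t, score))
--     result = []
--     for s in range(len(keywords), 0, -1):
--         result.extend(buckets.get(s, []))
--     return result[:top_n]
-- ===== Notes on version B (the rewrite author's own statement) =====
-- stated objective: alternative
-- what changed: Replaces the comparison sort (sort by -score then slice) with a counting/bucket sort: tables are appended to per-score buckets during the single scoring pass and the buckets are concatenated from the highest score down, reproducing the stable tie order.
import Mathlib
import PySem

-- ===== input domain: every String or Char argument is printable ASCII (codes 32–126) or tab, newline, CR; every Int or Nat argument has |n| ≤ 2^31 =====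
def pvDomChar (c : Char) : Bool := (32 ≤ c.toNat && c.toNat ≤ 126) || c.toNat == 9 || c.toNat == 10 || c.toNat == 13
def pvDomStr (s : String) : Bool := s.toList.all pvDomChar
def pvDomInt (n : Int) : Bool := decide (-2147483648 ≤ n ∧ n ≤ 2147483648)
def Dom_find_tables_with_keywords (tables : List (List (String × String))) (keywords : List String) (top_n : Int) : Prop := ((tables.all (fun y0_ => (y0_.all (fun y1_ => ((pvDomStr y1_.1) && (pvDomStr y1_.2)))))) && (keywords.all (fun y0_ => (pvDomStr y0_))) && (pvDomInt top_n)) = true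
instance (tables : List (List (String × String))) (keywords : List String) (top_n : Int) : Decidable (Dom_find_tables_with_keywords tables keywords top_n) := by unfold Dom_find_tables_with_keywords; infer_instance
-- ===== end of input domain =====

-- B replaces A's comparison sort (sort by -score, then slice) with a counting/bucket
-- sort: per-score buckets filled in one scan, concatenated from the highest score down
-- (objective: alternative algorithm, identical output including tie order).

-- ===== PORT A =====
-- t["flat"] (first-match lookup); outside Pre_ (missing key with keywords ≠ []) Python raises KeyError, here the lookup defaults to "".
def pvFlat (t : List (String × String)) : String := ((PySem.Dict.mk t).get? "flat").getD ""

-- score = sum(1 for kw in keywords if kw in t["flat"])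
def pvScoreA (keywords : List String) (t : List (String × String)) : Int :=
  ((keywords.filter (fun kw => PySem.Str.isIn kw (pvFlat t))).map (fun _ => (1 : Int))).sum

def find_tables_with_keywords (tables : List (List (String × String))) (keywords : List String) (top_n : Int) : List ((List (String × String)) × Int) :=
  let scored := tables.foldl (fun scored t =>
    let score := pvScoreA keywords t
    if score > 0 then scored ++ [(t, score)] else scored) []
  let scored := PySem.List.sorted scored (fun x => -x.2)
  PySem.List.slice scored none (some top_n)

-- ===== PORT B =====
-- score accumulated by B's explicit loop over keywords
def pvScoreB (keywords : List String) (t : List (String × String)) : Int :=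
  keywords.foldl (fun sc kw => if PySem.Str.isIn kw (pvFlat t) then sc + 1 else sc) 0

def find_tables_with_keywords_alt (tables : List (List (String × String))) (keywords : List String) (top_n : Int) : List ((List (String × String)) × Int) :=
  let buckets := tables.foldl (fun (d : PySem.Dict Int (List ((List (String × String)) × Int))) t =>
    let score := pvScoreB keywords t
    if score > 0 then d.modify score [] (· ++ [(t, score)]) else d) PySem.Dict.empty
  let result := (PySem.List.pyRange (keywords.length : Int) 0 (-1)).foldl
    (fun acc s => acc ++ buckets.getD s []) []
  PySem.List.slice result none (some top_n)

-- ===== PRECONDITION & SPEC =====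
-- Pre_ excludes exactly the inputs where Python A raises KeyError: some table lacks the
-- key "flat" while keywords is non-empty (with keywords == [] the generator never looks it up).
def Pre_find_tables_with_keywords (tables : List (List (String × String))) (keywords : List String) (top_n : Int) : Prop :=
  keywords = [] ∨ ∀ t ∈ tables, ((PySem.Dict.mk t).contains "flat") = true
instance (tables : List (List (String × String))) (keywords : List String) (top_n : Int) : Decidable (Pre_find_tables_with_keywords tables keywords top_n) := by unfold Pre_find_tables_with_keywords; infer_instance

def pvWitness_find_tables_with_keywords : (List (List (String × String))) × List String × Int :=
  ([[("flat", "alpha beta")], [("flat", "beta")]], ["beta", "alpha"], 5)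

def Spec_find_tables_with_keywords (tables : List (List (String × String))) (keywords : List String) (top_n : Int) (out : List ((List (String × String)) × Int)) : Prop := out = find_tables_with_keywords_alt tables keywords top_n
instance (tables : List (List (String × String))) (keywords : List String) (top_n : Int) (out : List ((List (String × String)) × Int)) : Decidable (Spec_find_tables_with_keywords tables keywords top_n out) := by unfold Spec_find_tables_with_keywords; infer_instance

-- ===== CLAIM (what is proved, stated in full; the proofs are below) =====
def Claim_equal_find_tables_with_keywords : Prop := ∀ (tables : List (List (String × String))) (keywords : List String) (top_n : Int), Dom_find_tables_with_keywords tables keywords top_n → Pre_find_tables_with_keywords tables keywords top_n → Spec_find_tables_with_keywords tables keywords top_n (find_tables_with_keywords tables keywords top_n)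

-- ===== LEMMAS AND PROOFS =====

theorem score_eq (keywords : List String) (t : List (String × String)) :
    pvScoreB keywords t = pvScoreA keywords t := by
  unfold pvScoreB pvScoreA
  rw [PySem.List.foldl_count_if]
  simp [List.countP_eq_length_filter]

theorem insertBy_append_all {α : Type} (before : α → α → Bool) (x : α) (P S : List α)
    (hP : ∀ y ∈ P, before x y = false) (hS : ∀ y ∈ S, before x y = true) :
    PySem.List.insertBy before x (P ++ S) = P ++ x :: S := by
  induction P with
  | nil =>
    cases S with
    | nil => simp [PySem.List.insertBy]
    | cons y ys => simp [PySem.List.insertBy, hS y (by simp)]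
  | cons p P' ih =>
    have hp := hP p (by simp)
    simp only [List.cons_append, PySem.List.insertBy, hp]
    simp [ih (fun y hy => hP y (by simp [hy]))]

theorem pyRange_neg_split (K s : Int) (h1 : 1 ≤ s) (h2 : s ≤ K) :
    PySem.List.pyRange K 0 (-1) =
      PySem.List.pyRange K s (-1) ++ [s] ++ PySem.List.pyRange (s - 1) 0 (-1) := by
  rw [PySem.List.pyRange_neg_one_eq_reverse, PySem.List.pyRange_neg_one_eq_reverse,
      PySem.List.pyRange_neg_one_eq_reverse]
  rw [show (0:Int) + 1 = 1 by ring, show s - 1 + 1 = s by ring]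
  rw [PySem.List.pyRange_one_append 1 s (K+1) h1 (by omega),
      PySem.List.pyRange_one_append s (s+1) (K+1) (by omega) (by omega),
      PySem.List.pyRange_one_singleton]
  simp

theorem flatMap_congr' {α β : Type} (l : List α) (f g : α → List β)
    (h : ∀ a ∈ l, f a = g a) : l.flatMap f = l.flatMap g := by
  induction l with
  | nil => rfl
  | cons a l ih => simp [List.flatMap_cons, h a (by simp), ih (fun a ha => h a (by simp [ha]))]

theorem sorted_bucket {α : Type} (xs : List (α × Int)) (K : Int)
    (h : ∀ p ∈ xs, 1 ≤ p.2 ∧ p.2 ≤ K) :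
    PySem.List.sorted xs (fun x => -x.2) =
      (PySem.List.pyRange K 0 (-1)).flatMap (fun s => xs.filter (fun p => p.2 == s)) := by
  induction xs using List.reverseRecOn with
  | nil => simp [PySem.List.sorted_eq_foldl_insertBy]
  | append_singleton ys x ih =>
    obtain ⟨hx1, hx2⟩ := h x (by simp)
    have hys : ∀ p ∈ ys, 1 ≤ p.2 ∧ p.2 ≤ K := fun p hp => h p (by simp [hp])
    rw [PySem.List.sorted_eq_foldl_insertBy, List.foldl_append, List.foldl_cons, List.foldl_nil,
        ← PySem.List.sorted_eq_foldl_insertBy, ih hys]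
    rw [pyRange_neg_split K x.2 hx1 hx2]
    simp only [List.flatMap_append, List.flatMap_cons, List.flatMap_nil, List.append_nil]
    have hhigh : (PySem.List.pyRange K x.2 (-1)).flatMap (fun s => (ys ++ [x]).filter (fun p => p.2 == s))
        = (PySem.List.pyRange K x.2 (-1)).flatMap (fun s => ys.filter (fun p => p.2 == s)) := by
      apply flatMap_congr'
      intro s hs
      have : x.2 < s := ((PySem.List.mem_pyRange_neg_one).1 hs).1
      have hne : (x.2 == s) = false := by simp; omega
      simp [List.filter_append, hne]
    have hlow : (PySem.List.pyRange (x.2 - 1) 0 (-1)).flatMap (fun s => (ys ++ [x]).filter (fun p => p.2 == s))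
        = (PySem.List.pyRange (x.2 - 1) 0 (-1)).flatMap (fun s => ys.filter (fun p => p.2 == s)) := by
      apply flatMap_congr'
      intro s hs
      have : s ≤ x.2 - 1 := ((PySem.List.mem_pyRange_neg_one).1 hs).2
      have hne : (x.2 == s) = false := by simp; omega
      simp [List.filter_append, hne]
    have hmid : (ys ++ [x]).filter (fun p => p.2 == x.2) = ys.filter (fun p => p.2 == x.2) ++ [x] := by
      simp [List.filter_append]
    rw [hhigh, hlow, hmid]
    have hP : ∀ y ∈ (PySem.List.pyRange K x.2 (-1)).flatMap (fun s => ys.filter (fun p => p.2 == s)) ++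
        ys.filter (fun p => p.2 == x.2), (fun a b => decide (-a.2 < -(b.2 : Int))) x y = false := by
      intro y hy
      simp only [List.mem_append, List.mem_flatMap, List.mem_filter] at hy
      have hy2 : x.2 ≤ y.2 := by
        rcases hy with ⟨s, hs, _, hys⟩ | ⟨_, hys⟩
        · have h1 := ((PySem.List.mem_pyRange_neg_one).1 hs).1
          have h2 : y.2 = s := by simpa using hys
          omega
        · have h2 : y.2 = x.2 := by simpa using hys
          omega
      simp; omega
    have hS : ∀ y ∈ (PySem.List.pyRange (x.2 - 1) 0 (-1)).flatMap (fun s => ys.filter (fun p => p.2 == s)),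
        (fun a b => decide (-a.2 < -(b.2 : Int))) x y = true := by
      intro y hy
      simp only [List.mem_flatMap, List.mem_filter] at hy
      obtain ⟨s, hs, _, hys⟩ := hy
      have hsle := ((PySem.List.mem_pyRange_neg_one).1 hs).2
      have h2 : y.2 = s := by simpa using hys
      simp; omega
    rw [insertBy_append_all _ x _ _ hP hS]
    simp

theorem foldlA_eq {α : Type} (sc : α → Int) (l : List α) (acc : List (α × Int)) :
    l.foldl (fun acc t => let score := sc t; if score > 0 then acc ++ [(t, score)] else acc) acc
      = acc ++ (l.filter (fun t => decide (0 < sc t))).map (fun t => (t, sc t)) := by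
  induction l generalizing acc with
  | nil => simp
  | cons a l ih => by_cases h : 0 < sc a <;> simp [h, ih]

theorem foldlB_eq {α : Type} (sc : α → Int) (l : List α) (init : PySem.Dict Int (List (α × Int))) :
    l.foldl (fun d t => if sc t > 0 then d.modify (sc t) [] (· ++ [(t, sc t)]) else d) init
      = (l.filter (fun t => decide (0 < sc t))).foldl (fun d t => d.modify (sc t) [] (· ++ [(t, sc t)])) init := by
  induction l generalizing init with
  | nil => rfl
  | cons a l ih => by_cases h : 0 < sc a <;> simp [h, ih]

theorem ports_eq (tables : List (List (String × String))) (keywords : List String) (top_n : Int) :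
    find_tables_with_keywords tables keywords top_n = find_tables_with_keywords_alt tables keywords top_n := by
  unfold find_tables_with_keywords find_tables_with_keywords_alt
  simp only [score_eq]
  rw [foldlA_eq (pvScoreA keywords) tables [],
      foldlB_eq (pvScoreA keywords) tables PySem.Dict.empty,
      List.nil_append]
  set p : List (String × String) → Bool := fun t => decide (0 < pvScoreA keywords t) with hp
  set f : List (String × String) → ((List (String × String)) × Int) := fun t => (t, pvScoreA keywords t) with hf
  have hbuck : (tables.filter p).foldl
        (fun d t => d.modify (pvScoreA keywords t) [] (· ++ [(t, pvScoreA keywords t)])) PySem.Dict.empty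
      = ((tables.filter p).map (fun t => (pvScoreA keywords t, f t))).foldl
          (fun d q => d.modify q.1 [] (· ++ [q.2])) PySem.Dict.empty := by
    rw [List.foldl_map]
  rw [hbuck]
  have hgetD : ∀ s : Int,
      (((tables.filter p).map (fun t => (pvScoreA keywords t, f t))).foldl
          (fun d q => d.modify q.1 [] (· ++ [q.2])) PySem.Dict.empty).getD s []
        = ((tables.filter p).map f).filter (fun pr => pr.2 == s) := by
    intro s
    rw [PySem.Dict.getD_foldl_modify_append]
    simp only [PySem.Dict.getD_empty, List.nil_append, List.filter_map, List.map_map]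
    congr 1
  rw [PySem.List.foldl_append_eq_flatMap, List.nil_append]
  rw [flatMap_congr' _ _ _ (fun s _ => hgetD s)]
  rw [sorted_bucket ((tables.filter p).map f) (keywords.length : Int) ?_]
  intro pr hpr
  simp only [List.mem_map, List.mem_filter] at hpr
  obtain ⟨t, ⟨_, hpt⟩, rfl⟩ := hpr
  have h1 : 0 < pvScoreA keywords t := by simpa [hp] using hpt
  have h2 : pvScoreA keywords t ≤ keywords.length := by
    unfold pvScoreA
    simp
    exact_mod_cast List.length_filter_le _ _
  exact ⟨by simpa [hf] using h1, by simpa [hf] using h2⟩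


-- ===== VERDICT (by name: the statement is the Claim_ definition above) =====
theorem find_tables_with_keywords_spec : Claim_equal_find_tables_with_keywords := by
  intro tables keywords top_n _ _
  exact ports_eq tables keywords top_n
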